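-- pv_equiv track=rewrite | github.com/AryanGanotra07/DSALGO | DP/snakeSequence.py | findMaxLengthSnakeSequence
-- ===== SOURCE A (Python) =====
-- def constructPath(L, grid, tail):
--
-- 	(i, j) = tail
-- 	path = [tail]
--
-- 	# start from snake's tail till snake's head
-- 	while L[i][j]:
-- 		if i - 1 >= 0 and L[i][j] - L[i - 1][j] == 1 and \
--                 abs(grid[i - 1][j] - grid[i][j]) == 1:
-- 			path.append((i - 1, j))
-- 			i = i - 1
-- 		elif j - 1 >= 0 and L[i][j] - L[i][j - 1] == 1 and \
--                 abs(grid[i][j - 1] - grid[i][j]) == 1: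
-- 			path.append((i, j - 1))
-- 			j = j - 1
--
-- 	return path
--
-- def findMaxLengthSnakeSequence(grid):
--
-- 	# L[i][j] stores the maximum length of snake sequence
-- 	# ending at cell (i, j)
-- 	L = [[0 for x in range(len(grid))] for y in range(len(grid))]
--
-- 	# stores maximum length of Snake sequence
-- 	max_so_far = 0
--
-- 	# Pair to store coordinates of snake's tail
-- 	tail = None
--
-- 	# process the matrix in bottom-up fashion
-- 	for i in range(len(grid)):
-- 		for j in range(len(grid)):
-- 			# compare current cell with top cell and check absolute difference
-- 			if i - 1 >= 0 and abs(grid[i - 1][j] - grid[i][j]) == 1: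
-- 				L[i][j] = L[i - 1][j] + 1
-- 				if max_so_far < L[i][j]:
-- 					max_so_far = L[i][j]
-- 					tail = (i, j)
--
-- 			# compare current cell with left cell and check absolute difference
-- 			if j - 1 >= 0 and abs(grid[i][j - 1] - grid[i][j]) == 1:
-- 				# L[i][j] can be non-zero at this point, hence take maximum
-- 				L[i][j] = max(L[i][j], L[i][j - 1] + 1)
-- 				if max_so_far < L[i][j]:
-- 					max_so_far = L[i][j]
-- 					tail = (i, j)
--
-- 	# construct maximum length snake sequence
-- 	return constructPath(L, grid, tail)
-- ===== SOURCE B (Python) =====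
-- # B: single forward pass that carries, for every cell, the whole best snake as a
-- # shared cons-chain (cell, parent); the best chain is picked on the fly, so there
-- # is no L-table backtracking phase at all.
-- def findMaxLengthSnakeSequence(grid):
--     n = len(grid)
--     rows = []                      # rows[i][j] = (length, chain) for cell (i, j)
--     best_len, best_chain = 0, None
--     for i in range(n):
--         row = []
--         for j in range(n):
--             v = grid[i][j]
--             up = rows[i - 1][j] if i > 0 and abs(grid[i - 1][j] - v) == 1 else None
--             left = row[j - 1] if j > 0 and abs(grid[i][j - 1] - v) == 1 else None
--             if up is not None and (left is None or up[0] >= left[0]):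
--                 cell = (up[0] + 1, ((i, j), up[1]))
--             elif left is not None:
--                 cell = (left[0] + 1, ((i, j), left[1]))
--             else:
--                 cell = (0, ((i, j), None))
--             row.append(cell)
--             if cell[0] > best_len:
--                 best_len, best_chain = cell
--         rows.append(row)
--     path = []
--     node = best_chain
--     while node is not None:
--         path.append(node[0])
--         node = node[1]
--     return path
-- ===== Notes on version B (the rewrite author's own statement) =====
-- stated objective: alternative
-- what changed: A runs a length-only DP into a preallocated mutable L table and then a second backtracking phase (constructPath's while loop) to recover the path; B makes one forward pass that carries, for every cell, the whole best snake as a shared cons-chain (cell, parent) and picks the best chain on the fly, so no L table is kept for reconstruction and the backtracking phase disappears.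
import Mathlib
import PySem

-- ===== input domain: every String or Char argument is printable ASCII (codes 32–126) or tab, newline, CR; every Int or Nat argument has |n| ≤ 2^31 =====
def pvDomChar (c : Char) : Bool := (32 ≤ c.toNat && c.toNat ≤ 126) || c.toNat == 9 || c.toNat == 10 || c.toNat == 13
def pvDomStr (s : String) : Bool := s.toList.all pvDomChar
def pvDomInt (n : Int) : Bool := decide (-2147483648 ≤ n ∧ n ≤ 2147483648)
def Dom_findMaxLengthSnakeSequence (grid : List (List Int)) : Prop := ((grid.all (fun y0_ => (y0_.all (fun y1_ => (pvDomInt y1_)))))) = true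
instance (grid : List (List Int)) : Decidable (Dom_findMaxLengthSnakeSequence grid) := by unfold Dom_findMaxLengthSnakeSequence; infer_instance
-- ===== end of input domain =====

-- B replaces A's length-DP-plus-backtracking with a single forward pass that carries, for each
-- cell, the whole best snake as a shared cons-chain and picks the best chain on the fly; same
-- cost, a genuinely different data structure (no reconstruction phase).


-- ===== PORT A =====
-- `X[i][j]` (used for both `grid` and `L`); total with default 0 — inside Pre_ both Pythons
-- only ever index in range, where this is exact.
def at2 (X : List (List Int)) (i j : Int) : Int :=
  PySem.List.pyGetD (PySem.List.pyGetD X i []) j 0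

-- `L[i][j] = v`; the loops only produce indices that are nonnegative and in range, where
-- `List.set` is exactly Python's list assignment.
def put2 (L : List (List Int)) (i j : Int) (v : Int) : List (List Int) :=
  L.set i.toNat ((PySem.List.pyGetD L i []).set j.toNat v)

-- body of A's inner loop: the two `if` blocks over cell (i, j), threading (L, max_so_far, tail)
def aCell (grid : List (List Int)) (i : Int)
    (st : List (List Int) × Int × Option (Int × Int)) (j : Int) :
    List (List Int) × Int × Option (Int × Int) :=
  let st1 :=
    if 0 ≤ i - 1 ∧ (at2 grid (i - 1) j - at2 grid i j).natAbs = 1 then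
      let v := at2 st.1 (i - 1) j + 1
      let L' := put2 st.1 i j v
      if st.2.1 < v then (L', v, some (i, j)) else (L', st.2.1, st.2.2)
    else st
  if 0 ≤ j - 1 ∧ (at2 grid i (j - 1) - at2 grid i j).natAbs = 1 then
    let v := max (at2 st1.1 i j) (at2 st1.1 i (j - 1) + 1)
    let L' := put2 st1.1 i j v
    if st1.2.1 < v then (L', v, some (i, j)) else (L', st1.2.1, st1.2.2)
  else st1

def aRow (grid : List (List Int)) (n : Int)
    (st : List (List Int) × Int × Option (Int × Int)) (i : Int) :
    List (List Int) × Int × Option (Int × Int) :=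
  (PySem.List.pyRange 0 n 1).foldl (aCell grid i) st

-- constructPath's `while L[i][j]:` loop; fuel `L[tail]`.toNat bounds the iterations (each firing
-- branch lowers `L[i][j]` by exactly 1); when neither branch fires Python loops forever — the
-- port then idles on the unchanged state until the fuel is gone.
def cpGo (L grid : List (List Int)) : Nat → Int → Int → List (Int × Int) → List (Int × Int)
  | 0, _, _, path => path
  | fuel + 1, i, j, path =>
    if at2 L i j ≠ 0 then
      if 0 ≤ i - 1 ∧ at2 L i j - at2 L (i - 1) j = 1 ∧
          (at2 grid (i - 1) j - at2 grid i j).natAbs = 1 then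
        cpGo L grid fuel (i - 1) j (path ++ [(i - 1, j)])
      else if 0 ≤ j - 1 ∧ at2 L i j - at2 L i (j - 1) = 1 ∧
          (at2 grid i (j - 1) - at2 grid i j).natAbs = 1 then
        cpGo L grid fuel i (j - 1) (path ++ [(i, j - 1)])
      else
        cpGo L grid fuel i j path
    else path

def constructPath (L grid : List (List Int)) (tail : Int × Int) : List (Int × Int) :=
  cpGo L grid (at2 L tail.1 tail.2).toNat tail.1 tail.2 [tail]

def findMaxLengthSnakeSequence (grid : List (List Int)) : List (Int × Int) :=
  let n : Int := grid.length
  let L0 : List (List Int) :=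
    (PySem.List.pyRange 0 n 1).map (fun _ => (PySem.List.pyRange 0 n 1).map (fun _ => (0 : Int)))
  let st := (PySem.List.pyRange 0 n 1).foldl (aRow grid n) (L0, 0, none)
  match st.2.2 with
  | some t => constructPath st.1 grid t
  | none => []   -- Python raises TypeError here (tail is None): excluded by Pre_

-- ===== PORT B =====
-- B's chain: Python's nested pair ((i, j), parent) with None for "no parent"
inductive Chain where
  | nil : Chain
  | cons : Int → Int → Chain → Chain
deriving DecidableEq, Repr

-- body of B's inner loop: compute (length, chain) for cell (i, j) from the up/left neighbours,
-- append it to the current row and update (best_len, best_chain)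
def bCellB (grid : List (List Int)) (rows : List (List (Int × Chain))) (i : Int)
    (st : List (Int × Chain) × Int × Option Chain) (j : Int) :
    List (Int × Chain) × Int × Option Chain :=
  let v := at2 grid i j
  let up : Option (Int × Chain) :=
    if 0 < i ∧ (at2 grid (i - 1) j - v).natAbs = 1 then
      some (PySem.List.pyGetD (PySem.List.pyGetD rows (i - 1) []) j (0, Chain.nil))
    else none
  let lf : Option (Int × Chain) :=
    if 0 < j ∧ (at2 grid i (j - 1) - v).natAbs = 1 then
      some (PySem.List.pyGetD st.1 (j - 1) (0, Chain.nil))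
    else none
  let cell : Int × Chain :=
    match up, lf with
    | some u, some l =>
        if u.1 ≥ l.1 then (u.1 + 1, Chain.cons i j u.2) else (l.1 + 1, Chain.cons i j l.2)
    | some u, none => (u.1 + 1, Chain.cons i j u.2)
    | none, some l => (l.1 + 1, Chain.cons i j l.2)
    | none, none => (0, Chain.cons i j Chain.nil)
  (st.1 ++ [cell], if st.2.1 < cell.1 then (cell.1, some cell.2) else st.2)

def bRowB (grid : List (List Int)) (n : Int)
    (st : List (List (Int × Chain)) × Int × Option Chain) (i : Int) :
    List (List (Int × Chain)) × Int × Option Chain :=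
  let inner := (PySem.List.pyRange 0 n 1).foldl (bCellB grid st.1 i) ([], st.2)
  (st.1 ++ [inner.1], inner.2)

-- B's final `while node is not None` loop turning the chain into the path list
def unfoldChain : List (Int × Int) → Chain → List (Int × Int)
  | path, Chain.nil => path
  | path, Chain.cons i j p => unfoldChain (path ++ [(i, j)]) p

def findMaxLengthSnakeSequence_alt (grid : List (List Int)) : List (Int × Int) :=
  let n : Int := grid.length
  let st := (PySem.List.pyRange 0 n 1).foldl (bRowB grid n) ([], 0, none)
  match st.2.2 with
  | some c => unfoldChain [] c
  | none => []   -- best_chain is None: Python B returns the empty path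

-- ===== PRECONDITION & SPEC =====
-- Pre_ excludes exactly the inputs where Python A raises: a row shorter than len(grid)
-- (IndexError while indexing the n×n block) and grids with no two adjacent cells of the
-- n×n block differing by 1 (tail stays None and constructPath raises TypeError).
def Pre_findMaxLengthSnakeSequence (grid : List (List Int)) : Prop :=
  (∀ r ∈ grid, grid.length ≤ r.length) ∧
  (∃ i < grid.length, ∃ j < grid.length,
    (0 < i ∧ (at2 grid ((i : Int) - 1) (j : Int) - at2 grid (i : Int) (j : Int)).natAbs = 1) ∨
    (0 < j ∧ (at2 grid (i : Int) ((j : Int) - 1) - at2 grid (i : Int) (j : Int)).natAbs = 1))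

instance (grid : List (List Int)) : Decidable (Pre_findMaxLengthSnakeSequence grid) := by
  unfold Pre_findMaxLengthSnakeSequence; infer_instance

def pvWitness_findMaxLengthSnakeSequence : List (List Int) := [[1, 2], [0, 0]]

def Spec_findMaxLengthSnakeSequence (grid : List (List Int)) (out : List (Int × Int)) : Prop :=
  out = findMaxLengthSnakeSequence_alt grid
instance (grid : List (List Int)) (out : List (Int × Int)) :
    Decidable (Spec_findMaxLengthSnakeSequence grid out) := by
  unfold Spec_findMaxLengthSnakeSequence; infer_instance

-- ===== CLAIM (what is proved, stated in full; the proofs are below) =====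
def Claim_equal_findMaxLengthSnakeSequence : Prop :=
  ∀ (grid : List (List Int)), Dom_findMaxLengthSnakeSequence grid →
    Pre_findMaxLengthSnakeSequence grid →
    Spec_findMaxLengthSnakeSequence grid (findMaxLengthSnakeSequence grid)

-- ===== LEMMAS AND PROOFS =====

-- ---- proof-side view of A's DP table: the length-only table, built functionally ----
def bCell (grid rows : List (List Int)) (i : Int) (row : List Int) (j : Int) : List Int :=
  let up := if 0 < i ∧ (at2 grid (i - 1) j - at2 grid i j).natAbs = 1
            then at2 rows (i - 1) j + 1 else 0
  let lf := if 0 < j ∧ (at2 grid i (j - 1) - at2 grid i j).natAbs = 1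
            then PySem.List.pyGetD row (j - 1) 0 + 1 else 0
  row ++ [max up lf]

def bRow (grid : List (List Int)) (n : Int) (rows : List (List Int)) (i : Int) : List Int :=
  (PySem.List.pyRange 0 n 1).foldl (bCell grid rows i) []

def bTable (grid : List (List Int)) (n : Int) : List (List Int) :=
  (PySem.List.pyRange 0 n 1).foldl (fun rows i => rows ++ [bRow grid n rows i]) []

def bScanCell (T : List (List Int)) (i : Int) (bt : Int × Option (Int × Int)) (j : Int) :
    Int × Option (Int × Int) :=
  if bt.1 < at2 T i j then (at2 T i j, some (i, j)) else bt

-- proof-side views of the table's construction: the first k rows, and the first l cells of row k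
def TkF (grid : List (List Int)) (n : Int) (k : Nat) : List (List Int) :=
  (PySem.List.pyRange 0 (k : Int) 1).foldl (fun rows i => rows ++ [bRow grid n rows i]) []

def rpF (grid : List (List Int)) (n : Int) (k l : Nat) : List Int :=
  (PySem.List.pyRange 0 (l : Int) 1).foldl (bCell grid (TkF grid n k) (k : Int)) []

-- the two candidate values at cell (k, l)
def upv (grid : List (List Int)) (n : Int) (k l : Nat) : Int :=
  if 0 < (k : Int) ∧ (at2 grid ((k : Int) - 1) (l : Int) - at2 grid (k : Int) (l : Int)).natAbs = 1
  then at2 (TkF grid n k) ((k : Int) - 1) (l : Int) + 1 else 0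

def lfv (grid : List (List Int)) (n : Int) (k l : Nat) : Int :=
  if 0 < (l : Int) ∧ (at2 grid (k : Int) ((l : Int) - 1) - at2 grid (k : Int) (l : Int)).natAbs = 1
  then PySem.List.pyGetD (rpF grid n k l) ((l : Int) - 1) 0 + 1 else 0

lemma pyRange_succ (k : Nat) :
    PySem.List.pyRange 0 ((k : Int) + 1) 1 = PySem.List.pyRange 0 (k : Int) 1 ++ [(k : Int)] :=
  PySem.List.pyRange_one_succ_right (Int.natCast_nonneg k)

lemma TkF_succ (grid : List (List Int)) (n : Int) (k : Nat) :
    TkF grid n (k + 1) = TkF grid n k ++ [bRow grid n (TkF grid n k) (k : Int)] := by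
  have hc : ((k + 1 : Nat) : Int) = (k : Int) + 1 := by push_cast; ring
  unfold TkF
  rw [hc, pyRange_succ, List.foldl_append]
  rfl

lemma rpF_succ (grid : List (List Int)) (n : Int) (k l : Nat) :
    rpF grid n k (l + 1) = rpF grid n k l ++ [max (upv grid n k l) (lfv grid n k l)] := by
  have hc : ((l + 1 : Nat) : Int) = (l : Int) + 1 := by push_cast; ring
  unfold rpF
  rw [hc, pyRange_succ, List.foldl_append]
  simp only [List.foldl_cons, List.foldl_nil, bCell, upv, lfv]
  rfl

lemma length_TkF (grid : List (List Int)) (n : Int) (k : Nat) : (TkF grid n k).length = k := by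
  induction k with
  | zero => unfold TkF; rw [Nat.cast_zero, PySem.List.pyRange_one_eq_nil le_rfl]; rfl
  | succ k ih => rw [TkF_succ]; simp [ih]

lemma length_rpF (grid : List (List Int)) (n : Int) (k l : Nat) : (rpF grid n k l).length = l := by
  induction l with
  | zero => unfold rpF; rw [Nat.cast_zero, PySem.List.pyRange_one_eq_nil le_rfl]; rfl
  | succ l ih => rw [rpF_succ]; simp [ih]

lemma TkF_prefix (grid : List (List Int)) (n : Int) {k m : Nat} (h : k ≤ m) :
    ∃ s, TkF grid n m = TkF grid n k ++ s := by
  induction m, h using Nat.le_induction with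
  | base => exact ⟨[], by simp⟩
  | succ m hm ih =>
    obtain ⟨s, hs⟩ := ih
    exact ⟨s ++ [bRow grid n (TkF grid n m) (m : Int)], by
      rw [TkF_succ, hs, List.append_assoc]⟩

lemma rpF_prefix (grid : List (List Int)) (n : Int) (k : Nat) {l m : Nat} (h : l ≤ m) :
    ∃ s, rpF grid n k m = rpF grid n k l ++ s := by
  induction m, h using Nat.le_induction with
  | base => exact ⟨[], by simp⟩
  | succ m hm ih =>
    obtain ⟨s, hs⟩ := ih
    exact ⟨s ++ [max (upv grid n k m) (lfv grid n k m)], by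
      rw [rpF_succ, hs, List.append_assoc]⟩

lemma bTable_eq_TkF (grid : List (List Int)) (n : Nat) :
    bTable grid (n : Int) = TkF grid (n : Int) n := rfl

lemma bTable_at (grid : List (List Int)) (n : Nat) {k l : Nat} (hk : k < n) (hl : l < n) :
    at2 (bTable grid (n : Int)) (k : Int) (l : Int)
      = max (upv grid (n : Int) k l) (lfv grid (n : Int) k l) := by
  obtain ⟨s, hs⟩ := TkF_prefix grid (n : Int) (show k + 1 ≤ n from hk)
  have h1 : at2 (bTable grid (n : Int)) (k : Int) (l : Int)
      = ((TkF grid (n : Int) (k + 1) ++ s).getD k []).getD l 0 := by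
    rw [bTable_eq_TkF, hs]; simp [at2, PySem.List.pyGetD_natCast]
  have h2 : (TkF grid (n : Int) (k + 1) ++ s).getD k [] = rpF grid (n : Int) k n := by
    rw [List.getD_append _ _ _ k (by rw [length_TkF]; omega), TkF_succ,
        List.getD_append_right _ _ _ k (le_of_eq (length_TkF grid (n : Int) k)),
        length_TkF]
    simp
    rfl
  obtain ⟨s2, hs2⟩ := rpF_prefix grid (n : Int) k (show l + 1 ≤ n from hl)
  rw [h1, h2, hs2, List.getD_append _ _ _ l (by rw [length_rpF]; omega), rpF_succ,
      List.getD_append_right _ _ _ l (le_of_eq (length_rpF grid (n : Int) k l)),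
      length_rpF]
  simp

lemma pyGetD_nonneg {xs : List Int} (h : ∀ x ∈ xs, 0 ≤ x) (i : Int) :
    0 ≤ PySem.List.pyGetD xs i 0 := by
  rcases hy : PySem.List.pyGet? xs i with _ | y
  · rw [PySem.List.pyGetD_of_none xs i 0 hy]
  · rw [show PySem.List.pyGetD xs i 0 = (PySem.List.pyGet? xs i).getD 0 from rfl, hy]
    exact h y (PySem.List.mem_of_pyGet?_eq_some xs hy)

lemma at2_nonneg {X : List (List Int)} (h : ∀ r ∈ X, ∀ x ∈ r, 0 ≤ x) (i j : Int) :
    0 ≤ at2 X i j := by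
  unfold at2
  refine pyGetD_nonneg ?_ j
  rcases hy : PySem.List.pyGet? X i with _ | r
  · rw [PySem.List.pyGetD_of_none X i [] hy]; intro x hx; simp at hx
  · rw [show PySem.List.pyGetD X i [] = (PySem.List.pyGet? X i).getD [] from rfl, hy]
    exact h r (PySem.List.mem_of_pyGet?_eq_some X hy)

lemma nn_rpF_aux (grid : List (List Int)) (n k : Nat)
    (hT : ∀ r ∈ TkF grid (n : Int) k, ∀ x ∈ r, 0 ≤ x) :
    ∀ l, ∀ x ∈ rpF grid (n : Int) k l, 0 ≤ x := by
  intro l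
  induction l with
  | zero =>
    intro x hx
    unfold rpF at hx
    rw [Nat.cast_zero, PySem.List.pyRange_one_eq_nil le_rfl] at hx
    simp at hx
  | succ l ih =>
    intro x hx
    rw [rpF_succ] at hx
    rcases List.mem_append.mp hx with h | h
    · exact ih x h
    · simp only [List.mem_singleton] at h
      subst h
      have h1 : 0 ≤ upv grid (n : Int) k l := by
        unfold upv; split_ifs with h'
        · have := at2_nonneg hT ((k : Int) - 1) (l : Int); omega
        · exact le_rfl
      exact le_max_of_le_left h1

lemma nn_TkF (grid : List (List Int)) (n : Nat) (k : Nat) :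
    ∀ r ∈ TkF grid (n : Int) k, ∀ x ∈ r, 0 ≤ x := by
  induction k with
  | zero =>
    intro r hr
    unfold TkF at hr
    rw [Nat.cast_zero, PySem.List.pyRange_one_eq_nil le_rfl] at hr
    simp at hr
  | succ k ih =>
    intro r hr
    rw [TkF_succ] at hr
    rcases List.mem_append.mp hr with h | h
    · exact ih r h
    · simp only [List.mem_singleton] at h
      subst h
      exact nn_rpF_aux grid n k ih n

lemma nnT (grid : List (List Int)) (n : Nat) (i j : Int) :
    0 ≤ at2 (bTable grid (n : Int)) i j :=
  at2_nonneg (nn_TkF grid n n) i j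

lemma scan_fst_nonneg (T : List (List Int)) (i : Int) (js : List Int)
    {bt : Int × Option (Int × Int)} (h : 0 ≤ bt.1) :
    0 ≤ (js.foldl (bScanCell T i) bt).1 := by
  induction js generalizing bt with
  | nil => simpa
  | cons j js ih =>
    simp only [List.foldl_cons]
    apply ih
    dsimp only [bScanCell]
    split_ifs with hlt
    · dsimp only; omega
    · exact h

lemma scan_rows_fst_nonneg (T : List (List Int)) (n : Int) (is : List Int)
    {bt : Int × Option (Int × Int)} (h : 0 ≤ bt.1) :
    0 ≤ (is.foldl (fun bt i => (PySem.List.pyRange 0 n 1).foldl (bScanCell T i) bt) bt).1 := by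
  induction is generalizing bt with
  | nil => simpa
  | cons i' is ih =>
    simp only [List.foldl_cons]
    exact ih (scan_fst_nonneg T i' _ h)

lemma map_const_pyRange (n : Nat) {α : Type} (x : α) :
    (PySem.List.pyRange 0 (n : Int) 1).map (fun _ => x) = List.replicate n x := by
  rw [PySem.List.pyRange_one, List.map_const']
  simp

-- the heart of the A side: one cell of A's loop maps the (k, l)-state to the (k, l+1)-state and
-- performs the strict-max scan update for cell (k, l)
lemma aCell_step (grid : List (List Int)) (n : Nat) {k l : Nat} (hk : k < n) (hl : l < n)
    (mt : Int × Option (Int × Int)) (hm : 0 ≤ mt.1) :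
    aCell grid (k : Int)
      (TkF grid (n : Int) k ++ (rpF grid (n : Int) k l ++ List.replicate (n - l) 0)
          :: List.replicate (n - k - 1) (List.replicate n 0), mt) (l : Int)
    = (TkF grid (n : Int) k ++ (rpF grid (n : Int) k (l + 1) ++ List.replicate (n - (l + 1)) 0)
          :: List.replicate (n - k - 1) (List.replicate n 0),
       bScanCell (bTable grid (n : Int)) (k : Int) mt (l : Int)) := by
  obtain ⟨m, t⟩ := mt
  simp only at hm
  have hsub : n - (l + 1) = n - l - 1 := by omega
  rw [hsub, rpF_succ]
  simp only [List.append_assoc, List.singleton_append]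
  simp only [bScanCell]
  rw [bTable_at grid n hk hl]
  simp only [upv, lfv]
  set P := TkF grid (n : Int) k with hPdef
  set pref := rpF grid (n : Int) k l with hprefdef
  set Z := List.replicate (n - k - 1) (List.replicate n (0 : Int)) with hZdef
  have hlenP : P.length = k := length_TkF grid (n : Int) k
  have hlenpref : pref.length = l := length_rpF grid (n : Int) k l
  have hrep : List.replicate (n - l) (0 : Int) = 0 :: List.replicate (n - l - 1) 0 := by
    obtain ⟨m2, hm2⟩ : ∃ m2, n - l = m2 + 1 := ⟨n - l - 1, by omega⟩
    rw [hm2]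
    simp [List.replicate_succ]
  rw [hrep]
  set rest := List.replicate (n - l - 1) (0 : Int) with hrestdef
  have hrow : ∀ X : List Int, PySem.List.pyGetD (P ++ X :: Z) (k : Int) [] = X := by
    intro X
    rw [PySem.List.pyGetD_natCast, List.getD_append_right _ _ _ k (le_of_eq hlenP), hlenP,
        Nat.sub_self]
    rfl
  have htop : 0 < k → ∀ X : List Int,
      at2 (P ++ X :: Z) ((k : Int) - 1) (l : Int) = at2 P ((k : Int) - 1) (l : Int) := by
    intro hk0 X
    unfold at2
    rw [show ((k : Int) - 1) = ((k - 1 : Nat) : Int) by omega]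
    simp only [PySem.List.pyGetD_natCast]
    rw [List.getD_append _ _ _ (k - 1) (by rw [hlenP]; omega)]
  have hat_cur : ∀ (v : Int), at2 (P ++ (pref ++ v :: rest) :: Z) (k : Int) (l : Int) = v := by
    intro v
    unfold at2
    rw [hrow, PySem.List.pyGetD_natCast, List.getD_append_right _ _ _ l (le_of_eq hlenpref),
        hlenpref, Nat.sub_self]
    rfl
  have hat_left : 0 < l → ∀ (v : Int),
      at2 (P ++ (pref ++ v :: rest) :: Z) (k : Int) ((l : Int) - 1)
        = PySem.List.pyGetD pref ((l : Int) - 1) 0 := by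
    intro hl0 v
    unfold at2
    rw [hrow, show ((l : Int) - 1) = ((l - 1 : Nat) : Int) by omega]
    simp only [PySem.List.pyGetD_natCast]
    rw [List.getD_append _ _ _ (l - 1) (by rw [hlenpref]; omega)]
  have hput : ∀ (v w : Int), put2 (P ++ (pref ++ w :: rest) :: Z) (k : Int) (l : Int) v
      = P ++ (pref ++ v :: rest) :: Z := by
    intro v w
    unfold put2
    rw [hrow, Int.toNat_natCast, Int.toNat_natCast]
    simp only [List.set_append, hlenP, hlenpref, lt_self_iff_false, if_false, Nat.sub_self,
      List.set_cons_zero]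
  by_cases hc1 : 0 ≤ (k : Int) - 1 ∧
      (at2 grid ((k : Int) - 1) (l : Int) - at2 grid (k : Int) (l : Int)).natAbs = 1
  · have hk0 : 0 < k := by omega
    have hc1' : 0 < (k : Int) ∧
        (at2 grid ((k : Int) - 1) (l : Int) - at2 grid (k : Int) (l : Int)).natAbs = 1 :=
      ⟨by omega, hc1.2⟩
    simp only [aCell, if_pos hc1, if_pos hc1']
    rw [htop hk0]
    set u := at2 P ((k : Int) - 1) (l : Int) + 1 with hudef
    have hu1 : 0 < u := by
      have h := at2_nonneg (nn_TkF grid n k) ((k : Int) - 1) (l : Int)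
      rw [← hPdef] at h
      omega
    by_cases hc2 : 0 ≤ (l : Int) - 1 ∧
        (at2 grid (k : Int) ((l : Int) - 1) - at2 grid (k : Int) (l : Int)).natAbs = 1
    · have hl0 : 0 < l := by omega
      have hc2' : 0 < (l : Int) ∧
          (at2 grid (k : Int) ((l : Int) - 1) - at2 grid (k : Int) (l : Int)).natAbs = 1 :=
        ⟨by omega, hc2.2⟩
      simp only [if_pos hc2, if_pos hc2']
      set w := PySem.List.pyGetD pref ((l : Int) - 1) 0 + 1 with hwdef
      by_cases hmu : m < u
      · rw [if_pos hmu]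
        simp only [hput]
        rw [hat_cur, hat_left hl0, ← hwdef]
        by_cases hvv : u < max u w
        · rw [if_pos hvv, if_pos (show m < max u w by omega)]
        · rw [if_neg hvv]
          have hmw : max u w = u := by
            have := le_max_left u w
            omega
          rw [hmw, if_pos hmu]
      · rw [if_neg hmu]
        simp only [hput]
        rw [hat_cur, hat_left hl0, ← hwdef]
        by_cases hm2 : m < max u w
        · rw [if_pos hm2, if_pos hm2]
        · rw [if_neg hm2, if_neg hm2]
    · have hc2' : ¬ (0 < (l : Int) ∧
          (at2 grid (k : Int) ((l : Int) - 1) - at2 grid (k : Int) (l : Int)).natAbs = 1) :=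
        fun hc => hc2 ⟨by omega, hc.2⟩
      simp only [if_neg hc2, if_neg hc2']
      have hmax : max u 0 = u := max_eq_left (by omega)
      rw [hmax]
      by_cases hmu : m < u
      · rw [if_pos hmu, if_pos hmu]
        simp only [hput]
      · rw [if_neg hmu, if_neg hmu]
        simp only [hput]
  · have hc1' : ¬ (0 < (k : Int) ∧
        (at2 grid ((k : Int) - 1) (l : Int) - at2 grid (k : Int) (l : Int)).natAbs = 1) :=
      fun hc => hc1 ⟨by omega, hc.2⟩
    simp only [aCell, if_neg hc1, if_neg hc1']
    by_cases hc2 : 0 ≤ (l : Int) - 1 ∧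
        (at2 grid (k : Int) ((l : Int) - 1) - at2 grid (k : Int) (l : Int)).natAbs = 1
    · have hl0 : 0 < l := by omega
      have hc2' : 0 < (l : Int) ∧
          (at2 grid (k : Int) ((l : Int) - 1) - at2 grid (k : Int) (l : Int)).natAbs = 1 :=
        ⟨by omega, hc2.2⟩
      simp only [if_pos hc2, if_pos hc2']
      rw [hat_cur, hat_left hl0]
      simp only [hput]
      by_cases hm2 : m < max 0 (PySem.List.pyGetD pref ((l : Int) - 1) 0 + 1)
      · rw [if_pos hm2, if_pos hm2]
      · rw [if_neg hm2, if_neg hm2]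
    · have hc2' : ¬ (0 < (l : Int) ∧
          (at2 grid (k : Int) ((l : Int) - 1) - at2 grid (k : Int) (l : Int)).natAbs = 1) :=
        fun hc => hc2 ⟨by omega, hc.2⟩
      simp only [if_neg hc2, if_neg hc2']
      rw [max_self, if_neg (show ¬ m < (0 : Int) by omega)]

lemma inner_inv (grid : List (List Int)) (n : Nat) {k : Nat} (hk : k < n)
    (mt : Int × Option (Int × Int)) (hm : 0 ≤ mt.1) :
    ∀ l ≤ n,
      (PySem.List.pyRange 0 (l : Int) 1).foldl (aCell grid (k : Int))
        (TkF grid (n : Int) k ++ List.replicate (n - k) (List.replicate n 0), mt)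
      = (TkF grid (n : Int) k ++ (rpF grid (n : Int) k l ++ List.replicate (n - l) 0)
            :: List.replicate (n - k - 1) (List.replicate n 0),
         (PySem.List.pyRange 0 (l : Int) 1).foldl
           (bScanCell (bTable grid (n : Int)) (k : Int)) mt) := by
  intro l
  induction l with
  | zero =>
    intro _
    rw [Nat.cast_zero, PySem.List.pyRange_one_eq_nil le_rfl]
    simp only [List.foldl_nil]
    have h0 : rpF grid (n : Int) k 0 = [] := by
      unfold rpF
      rw [Nat.cast_zero, PySem.List.pyRange_one_eq_nil le_rfl]
      rfl
    rw [h0]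
    simp only [List.nil_append, Nat.sub_zero]
    obtain ⟨m2, hm2⟩ : ∃ m2, n - k = m2 + 1 := ⟨n - k - 1, by omega⟩
    rw [hm2]
    simp [List.replicate_succ]
  | succ l ih =>
    intro hl1
    rw [show ((l + 1 : Nat) : Int) = (l : Int) + 1 by push_cast; ring, pyRange_succ,
        List.foldl_append, List.foldl_append, List.foldl_cons, List.foldl_nil,
        ih (by omega)]
    exact aCell_step grid n hk _ (scan_fst_nonneg _ _ _ hm) (hl := by omega)

lemma outer_inv (grid : List (List Int)) (n : Nat) :
    ∀ k ≤ n,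
      (PySem.List.pyRange 0 (k : Int) 1).foldl (aRow grid (n : Int))
        (List.replicate n (List.replicate n 0), 0, none)
      = (TkF grid (n : Int) k ++ List.replicate (n - k) (List.replicate n 0),
         (PySem.List.pyRange 0 (k : Int) 1).foldl
           (fun bt i => (PySem.List.pyRange 0 (n : Int) 1).foldl
              (bScanCell (bTable grid (n : Int)) i) bt) (0, none)) := by
  intro k
  induction k with
  | zero =>
    intro _
    rw [Nat.cast_zero, PySem.List.pyRange_one_eq_nil le_rfl]
    simp only [List.foldl_nil]
    have h0 : TkF grid (n : Int) 0 = [] := by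
      unfold TkF
      rw [Nat.cast_zero, PySem.List.pyRange_one_eq_nil le_rfl]
      rfl
    rw [h0]
    simp
  | succ k ih =>
    intro hk1
    rw [show ((k + 1 : Nat) : Int) = (k : Int) + 1 by push_cast; ring, pyRange_succ,
        List.foldl_append, List.foldl_append, List.foldl_cons, List.foldl_nil,
        ih (by omega)]
    unfold aRow
    rw [inner_inv grid n (show k < n by omega) _
        (scan_rows_fst_nonneg _ _ _ (by norm_num)) n le_rfl]
    rw [Nat.sub_self, List.replicate_zero, List.append_nil, TkF_succ]
    have hbr : bRow grid (n : Int) (TkF grid (n : Int) k) (k : Int) = rpF grid (n : Int) k n := rfl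
    rw [hbr, show n - (k + 1) = n - k - 1 by omega, List.append_assoc, List.singleton_append]
    rfl

-- ---- B side: the chain each cell carries, as a recursive function of the cell ----
def chF (grid : List (List Int)) (n : Int) : Nat → Nat → Chain
  | k, l =>
    if h1 : 0 < k ∧ (at2 grid ((k : Int) - 1) (l : Int) - at2 grid (k : Int) (l : Int)).natAbs = 1 ∧
        (¬ (0 < l ∧ (at2 grid (k : Int) ((l : Int) - 1) - at2 grid (k : Int) (l : Int)).natAbs = 1) ∨
         at2 (bTable grid n) ((k : Int) - 1) (l : Int) ≥ at2 (bTable grid n) (k : Int) ((l : Int) - 1))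
    then Chain.cons (k : Int) (l : Int) (chF grid n (k - 1) l)
    else if 0 < l ∧ (at2 grid (k : Int) ((l : Int) - 1) - at2 grid (k : Int) (l : Int)).natAbs = 1
    then Chain.cons (k : Int) (l : Int) (chF grid n k (l - 1))
    else Chain.cons (k : Int) (l : Int) Chain.nil
  termination_by k l => k + l
  decreasing_by
  · have := h1.1; omega
  · omega

-- row of the length table, extracted
lemma Trow (grid : List (List Int)) (n : Nat) {k : Nat} (hk : k < n) :
    PySem.List.pyGetD (bTable grid (n : Int)) (k : Int) [] = rpF grid (n : Int) k n := by
  obtain ⟨s, hs⟩ := TkF_prefix grid (n : Int) (show k + 1 ≤ n from hk)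
  rw [bTable_eq_TkF, hs, PySem.List.pyGetD_natCast,
      List.getD_append _ _ _ k (by rw [length_TkF]; omega), TkF_succ,
      List.getD_append_right _ _ _ k (le_of_eq (length_TkF grid (n : Int) k)), length_TkF]
  simp
  rfl

-- the DP recurrence of the length table, in neighbour form
lemma bTable_at' (grid : List (List Int)) (n : Nat) {k l : Nat} (hk : k < n) (hl : l < n) :
    at2 (bTable grid (n : Int)) (k : Int) (l : Int)
      = max (if 0 < k ∧ (at2 grid ((k : Int) - 1) (l : Int) - at2 grid (k : Int) (l : Int)).natAbs = 1
             then at2 (bTable grid (n : Int)) ((k : Int) - 1) (l : Int) + 1 else 0)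
            (if 0 < l ∧ (at2 grid (k : Int) ((l : Int) - 1) - at2 grid (k : Int) (l : Int)).natAbs = 1
             then at2 (bTable grid (n : Int)) (k : Int) ((l : Int) - 1) + 1 else 0) := by
  rw [bTable_at grid n hk hl]
  unfold upv lfv
  congr 1
  · by_cases hu : 0 < k ∧ (at2 grid ((k : Int) - 1) (l : Int) - at2 grid (k : Int) (l : Int)).natAbs = 1
    · rw [if_pos ⟨by exact_mod_cast hu.1, hu.2⟩, if_pos hu]
      obtain ⟨s, hs⟩ := TkF_prefix grid (n : Int) (le_of_lt hk)
      have hks : ((k : Int) - 1) = ((k - 1 : Nat) : Int) := by omega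
      rw [hks, bTable_eq_TkF, hs]
      simp only [at2, PySem.List.pyGetD_natCast]
      rw [List.getD_append _ _ _ (k - 1) (by rw [length_TkF]; omega)]
    · rw [if_neg (fun hc => hu ⟨by exact_mod_cast hc.1, hc.2⟩), if_neg hu]
  · by_cases hlf : 0 < l ∧ (at2 grid (k : Int) ((l : Int) - 1) - at2 grid (k : Int) (l : Int)).natAbs = 1
    · rw [if_pos ⟨by exact_mod_cast hlf.1, hlf.2⟩, if_pos hlf]
      have h1 : at2 (bTable grid (n : Int)) (k : Int) ((l : Int) - 1)
          = PySem.List.pyGetD (rpF grid (n : Int) k n) ((l : Int) - 1) 0 := by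
        unfold at2; rw [Trow grid n hk]
      obtain ⟨s2, hs2⟩ := rpF_prefix grid (n : Int) k (le_of_lt hl)
      have hls : ((l : Int) - 1) = ((l - 1 : Nat) : Int) := by omega
      rw [h1, hs2, hls]
      simp only [PySem.List.pyGetD_natCast]
      rw [List.getD_append _ _ _ (l - 1) (by rw [length_rpF]; omega)]
    · rw [if_neg (fun hc => hlf ⟨by exact_mod_cast hc.1, hc.2⟩), if_neg hlf]

lemma cpGo_succ (L grid : List (List Int)) (fuel : Nat) (i j : Int) (path : List (Int × Int)) :
    cpGo L grid (fuel + 1) i j path =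
      if at2 L i j ≠ 0 then
        if 0 ≤ i - 1 ∧ at2 L i j - at2 L (i - 1) j = 1 ∧
            (at2 grid (i - 1) j - at2 grid i j).natAbs = 1 then
          cpGo L grid fuel (i - 1) j (path ++ [(i - 1, j)])
        else if 0 ≤ j - 1 ∧ at2 L i j - at2 L i (j - 1) = 1 ∧
            (at2 grid i (j - 1) - at2 grid i j).natAbs = 1 then
          cpGo L grid fuel i (j - 1) (path ++ [(i, j - 1)])
        else
          cpGo L grid fuel i j path
      else path := rfl

-- the terminal cell: both conditions fail, the table value is 0 and both walks stop
lemma recon_nil (grid : List (List Int)) (n : Nat) {k l : Nat} (hk : k < n) (hl : l < n)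
    (h1 : ¬ (0 < k ∧ (at2 grid ((k : Int) - 1) (l : Int) - at2 grid (k : Int) (l : Int)).natAbs = 1 ∧
        (¬ (0 < l ∧ (at2 grid (k : Int) ((l : Int) - 1) - at2 grid (k : Int) (l : Int)).natAbs = 1) ∨
         at2 (bTable grid (n : Int)) ((k : Int) - 1) (l : Int)
           ≥ at2 (bTable grid (n : Int)) (k : Int) ((l : Int) - 1))))
    (h2 : ¬ (0 < l ∧ (at2 grid (k : Int) ((l : Int) - 1) - at2 grid (k : Int) (l : Int)).natAbs = 1))
    (acc : List (Int × Int)) :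
    unfoldChain acc (Chain.cons (k : Int) (l : Int) Chain.nil)
      = cpGo (bTable grid (n : Int)) grid
          (at2 (bTable grid (n : Int)) (k : Int) (l : Int)).toNat (k : Int) (l : Int)
          (acc ++ [((k : Int), (l : Int))]) := by
  have hval : at2 (bTable grid (n : Int)) (k : Int) (l : Int) = 0 := by
    rw [bTable_at' grid n hk hl, if_neg h2, if_neg (fun hu => h1 ⟨hu.1, hu.2, Or.inl h2⟩)]
    simp
  rw [hval]
  simp [unfoldChain, cpGo]

-- B's chain at (k, l) unfolds to exactly A's constructPath walk from (k, l)
lemma recon (grid : List (List Int)) (n : Nat) :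
    ∀ s k l, k + l ≤ s → k < n → l < n → ∀ acc : List (Int × Int),
      unfoldChain acc (chF grid (n : Int) k l)
        = cpGo (bTable grid (n : Int)) grid
            (at2 (bTable grid (n : Int)) (k : Int) (l : Int)).toNat (k : Int) (l : Int)
            (acc ++ [((k : Int), (l : Int))]) := by
  intro s
  induction s with
  | zero =>
    intro k l hs hk hl acc
    rw [chF]
    split_ifs with h1 h2
    · exact absurd h1.1 (by omega)
    · exact absurd h2.1 (by omega)
    · exact recon_nil grid n hk hl h1 h2 acc
  | succ s ih =>
    intro k l hs hk hl acc
    rw [chF]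
    split_ifs with h1 h2
    · obtain ⟨hk0, hadj, hsel⟩ := h1
      have hks : ((k : Int) - 1) = ((k - 1 : Nat) : Int) := by omega
      have hnn := nnT grid n ((k : Int) - 1) (l : Int)
      have hval : at2 (bTable grid (n : Int)) (k : Int) (l : Int)
          = at2 (bTable grid (n : Int)) ((k : Int) - 1) (l : Int) + 1 := by
        rw [bTable_at' grid n hk hl, if_pos ⟨hk0, hadj⟩]
        rcases hsel with hnl | hge
        · rw [if_neg hnl]; omega
        · split_ifs with hl2
          · omega
          · omega
      have hfuel : (at2 (bTable grid (n : Int)) (k : Int) (l : Int)).toNat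
          = (at2 (bTable grid (n : Int)) ((k : Int) - 1) (l : Int)).toNat + 1 := by omega
      rw [hfuel, cpGo_succ,
          if_pos (show at2 (bTable grid (n : Int)) (k : Int) (l : Int) ≠ 0 by omega),
          if_pos ⟨by omega, by omega, hadj⟩]
      have hstep : unfoldChain acc (Chain.cons (k : Int) (l : Int) (chF grid (n : Int) (k - 1) l))
          = unfoldChain (acc ++ [((k : Int), (l : Int))]) (chF grid (n : Int) (k - 1) l) := rfl
      rw [hstep, hks]
      exact ih (k - 1) l (by omega) (by omega) hl _
    · obtain ⟨hl0, hadjL⟩ := h2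
      have hls : ((l : Int) - 1) = ((l - 1 : Nat) : Int) := by omega
      have hnnl := nnT grid n (k : Int) ((l : Int) - 1)
      have hnnu := nnT grid n ((k : Int) - 1) (l : Int)
      have hval : at2 (bTable grid (n : Int)) (k : Int) (l : Int)
          = at2 (bTable grid (n : Int)) (k : Int) ((l : Int) - 1) + 1 := by
        rw [bTable_at' grid n hk hl]
        by_cases hu : 0 < k ∧ (at2 grid ((k : Int) - 1) (l : Int) - at2 grid (k : Int) (l : Int)).natAbs = 1
        · rw [if_pos hu, if_pos ⟨hl0, hadjL⟩]
          have hlt : at2 (bTable grid (n : Int)) ((k : Int) - 1) (l : Int)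
              < at2 (bTable grid (n : Int)) (k : Int) ((l : Int) - 1) := by
            by_contra hge
            exact h1 ⟨hu.1, hu.2, Or.inr (by omega)⟩
          omega
        · rw [if_neg hu, if_pos ⟨hl0, hadjL⟩]; omega
      have hupfail : ¬ (0 ≤ (k : Int) - 1 ∧
          at2 (bTable grid (n : Int)) (k : Int) (l : Int)
            - at2 (bTable grid (n : Int)) ((k : Int) - 1) (l : Int) = 1 ∧
          (at2 grid ((k : Int) - 1) (l : Int) - at2 grid (k : Int) (l : Int)).natAbs = 1) := by
        rintro ⟨hge0, hdiff, hadjU⟩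
        have hk0 : 0 < k := by omega
        have hlt : at2 (bTable grid (n : Int)) ((k : Int) - 1) (l : Int)
            < at2 (bTable grid (n : Int)) (k : Int) ((l : Int) - 1) := by
          by_contra hge
          exact h1 ⟨hk0, hadjU, Or.inr (by omega)⟩
        omega
      have hfuel : (at2 (bTable grid (n : Int)) (k : Int) (l : Int)).toNat
          = (at2 (bTable grid (n : Int)) (k : Int) ((l : Int) - 1)).toNat + 1 := by omega
      rw [hfuel, cpGo_succ,
          if_pos (show at2 (bTable grid (n : Int)) (k : Int) (l : Int) ≠ 0 by omega),
          if_neg hupfail, if_pos ⟨by omega, by omega, hadjL⟩]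
      have hstep : unfoldChain acc (Chain.cons (k : Int) (l : Int) (chF grid (n : Int) k (l - 1)))
          = unfoldChain (acc ++ [((k : Int), (l : Int))]) (chF grid (n : Int) k (l - 1)) := rfl
      rw [hstep, hls]
      exact ih k (l - 1) (by omega) hk (by omega) _
    · exact recon_nil grid n hk hl h1 h2 acc

-- ---- B's fold, characterised ----
def Mpref (grid : List (List Int)) (n k l : Nat) : List (Int × Chain) :=
  (List.range l).map (fun (j : Nat) => (at2 (bTable grid (n : Int)) (k : Int) (j : Int), chF grid (n : Int) k j))

def Mtab (grid : List (List Int)) (n k : Nat) : List (List (Int × Chain)) :=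
  (List.range k).map (fun i => Mpref grid n i n)

def scStep (grid : List (List Int)) (n k l : Nat) (b : Int × Option Chain) : Int × Option Chain :=
  if b.1 < at2 (bTable grid (n : Int)) (k : Int) (l : Int)
  then (at2 (bTable grid (n : Int)) (k : Int) (l : Int), some (chF grid (n : Int) k l)) else b

def rowScan (grid : List (List Int)) (n k : Nat) (b : Int × Option Chain) : Int × Option Chain :=
  (List.range n).foldl (fun b j => scStep grid n k j b) b

lemma cellB_step (grid : List (List Int)) (n : Nat) {k l : Nat} (hk : k < n) (hl : l < n)
    (b : Int × Option Chain) :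
    bCellB grid (Mtab grid n k) (k : Int) (Mpref grid n k l, b) (l : Int)
      = (Mpref grid n k (l + 1), scStep grid n k l b) := by
  have hT := bTable_at' grid n hk hl
  have hUp : 0 < k →
      PySem.List.pyGetD (PySem.List.pyGetD (Mtab grid n k) ((k : Int) - 1) []) (l : Int) (0, Chain.nil)
        = (at2 (bTable grid (n : Int)) ((k : Int) - 1) (l : Int), chF grid (n : Int) (k - 1) l) := by
    intro hk0
    have hks : ((k : Int) - 1) = ((k - 1 : Nat) : Int) := by omega
    rw [hks]
    unfold Mtab Mpref
    simp only [PySem.List.pyGetD_natCast]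
    rw [PySem.List.getD_map_range _ k (k - 1) _ (by omega),
        PySem.List.getD_map_range _ n l _ hl]
  have hLf : 0 < l →
      PySem.List.pyGetD (Mpref grid n k l) ((l : Int) - 1) (0, Chain.nil)
        = (at2 (bTable grid (n : Int)) (k : Int) ((l : Int) - 1), chF grid (n : Int) k (l - 1)) := by
    intro hl0
    have hls : ((l : Int) - 1) = ((l - 1 : Nat) : Int) := by omega
    rw [hls]
    unfold Mpref
    simp only [PySem.List.pyGetD_natCast]
    rw [PySem.List.getD_map_range _ l (l - 1) _ (by omega)]
  have hMsucc : Mpref grid n k (l + 1)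
      = Mpref grid n k l ++ [(at2 (bTable grid (n : Int)) (k : Int) (l : Int), chF grid (n : Int) k l)] := by
    unfold Mpref
    simp [List.range_succ]
  simp only [bCellB, hMsucc, scStep]
  by_cases hu : 0 < k ∧ (at2 grid ((k : Int) - 1) (l : Int) - at2 grid (k : Int) (l : Int)).natAbs = 1
  · rw [if_pos ⟨by exact_mod_cast hu.1, hu.2⟩, hUp hu.1]
    by_cases hlf : 0 < l ∧ (at2 grid (k : Int) ((l : Int) - 1) - at2 grid (k : Int) (l : Int)).natAbs = 1
    · rw [if_pos ⟨by exact_mod_cast hlf.1, hlf.2⟩, hLf hlf.1]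
      dsimp only
      by_cases hge : at2 (bTable grid (n : Int)) ((k : Int) - 1) (l : Int)
          ≥ at2 (bTable grid (n : Int)) (k : Int) ((l : Int) - 1)
      · have hchain : chF grid (n : Int) k l = Chain.cons (k : Int) (l : Int) (chF grid (n : Int) (k - 1) l) := by
          rw [chF, dif_pos ⟨hu.1, hu.2, Or.inr hge⟩]
        have hv : at2 (bTable grid (n : Int)) (k : Int) (l : Int)
            = at2 (bTable grid (n : Int)) ((k : Int) - 1) (l : Int) + 1 := by
          rw [hT, if_pos hu, if_pos hlf]; omega
        simp [hv, hchain, hge]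
      · have hchain : chF grid (n : Int) k l = Chain.cons (k : Int) (l : Int) (chF grid (n : Int) k (l - 1)) := by
          rw [chF, dif_neg (fun hc => hc.2.2.elim (fun hn => hn hlf) (fun hg => absurd hg hge)),
              if_pos hlf]
        have hv : at2 (bTable grid (n : Int)) (k : Int) (l : Int)
            = at2 (bTable grid (n : Int)) (k : Int) ((l : Int) - 1) + 1 := by
          rw [hT, if_pos hu, if_pos hlf]; omega
        simp [hv, hchain, hge]
    · rw [if_neg (fun hc => hlf ⟨by exact_mod_cast hc.1, hc.2⟩)]
      dsimp only
      have hchain : chF grid (n : Int) k l = Chain.cons (k : Int) (l : Int) (chF grid (n : Int) (k - 1) l) := by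
        rw [chF, dif_pos ⟨hu.1, hu.2, Or.inl hlf⟩]
      have hv : at2 (bTable grid (n : Int)) (k : Int) (l : Int)
          = at2 (bTable grid (n : Int)) ((k : Int) - 1) (l : Int) + 1 := by
        have := nnT grid n ((k : Int) - 1) (l : Int)
        rw [hT, if_pos hu, if_neg hlf]; omega
      simp [hv, hchain]
  · rw [if_neg (fun hc => hu ⟨by exact_mod_cast hc.1, hc.2⟩)]
    by_cases hlf : 0 < l ∧ (at2 grid (k : Int) ((l : Int) - 1) - at2 grid (k : Int) (l : Int)).natAbs = 1
    · rw [if_pos ⟨by exact_mod_cast hlf.1, hlf.2⟩, hLf hlf.1]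
      dsimp only
      have hchain : chF grid (n : Int) k l = Chain.cons (k : Int) (l : Int) (chF grid (n : Int) k (l - 1)) := by
        rw [chF, dif_neg (fun hc => hu ⟨hc.1, hc.2.1⟩), if_pos hlf]
      have hv : at2 (bTable grid (n : Int)) (k : Int) (l : Int)
          = at2 (bTable grid (n : Int)) (k : Int) ((l : Int) - 1) + 1 := by
        have := nnT grid n (k : Int) ((l : Int) - 1)
        rw [hT, if_neg hu, if_pos hlf]; omega
      simp [hv, hchain]
    · rw [if_neg (fun hc => hlf ⟨by exact_mod_cast hc.1, hc.2⟩)]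
      dsimp only
      have hchain : chF grid (n : Int) k l = Chain.cons (k : Int) (l : Int) Chain.nil := by
        rw [chF, dif_neg (fun hc => hu ⟨hc.1, hc.2.1⟩), if_neg hlf]
      have hv : at2 (bTable grid (n : Int)) (k : Int) (l : Int) = 0 := by
        rw [hT, if_neg hu, if_neg hlf]; omega
      simp [hv, hchain]

lemma innerB (grid : List (List Int)) (n : Nat) {k : Nat} (hk : k < n) (b : Int × Option Chain) :
    ∀ l ≤ n,
      (PySem.List.pyRange 0 (l : Int) 1).foldl (bCellB grid (Mtab grid n k) (k : Int)) ([], b)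
        = (Mpref grid n k l, (List.range l).foldl (fun b j => scStep grid n k j b) b) := by
  intro l
  induction l with
  | zero =>
    intro _
    rw [Nat.cast_zero, PySem.List.pyRange_one_eq_nil le_rfl]
    simp [Mpref]
  | succ l ihl =>
    intro hl1
    rw [show ((l + 1 : Nat) : Int) = (l : Int) + 1 by push_cast; ring, pyRange_succ,
        List.foldl_append, ihl (by omega), List.foldl_cons, List.foldl_nil,
        cellB_step grid n hk (show l < n by omega) _,
        List.range_succ, List.foldl_append, List.foldl_cons, List.foldl_nil]

lemma outerB (grid : List (List Int)) (n : Nat) :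
    ∀ k ≤ n,
      (PySem.List.pyRange 0 (k : Int) 1).foldl (bRowB grid (n : Int)) ([], 0, none)
        = (Mtab grid n k,
           (List.range k).foldl (fun b i => rowScan grid n i b) ((0 : Int), (none : Option Chain))) := by
  intro k
  induction k with
  | zero =>
    intro _
    rw [Nat.cast_zero, PySem.List.pyRange_one_eq_nil le_rfl]
    simp [Mtab]
  | succ k ihk =>
    intro hk1
    rw [show ((k + 1 : Nat) : Int) = (k : Int) + 1 by push_cast; ring, pyRange_succ,
        List.foldl_append, ihk (by omega), List.foldl_cons, List.foldl_nil]
    simp only [bRowB]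
    rw [innerB grid n (show k < n by omega) _ n le_rfl]
    rw [List.range_succ, List.foldl_append, List.foldl_cons, List.foldl_nil]
    simp [Mtab, rowScan, List.range_succ]

-- ---- pairing A's (max, tail) scan with B's (best_len, best_chain) scan ----
def Rrel (grid : List (List Int)) (n : Nat)
    (bt : Int × Option (Int × Int)) (b : Int × Option Chain) : Prop :=
  bt.1 = b.1 ∧ ((bt.2 = none ∧ b.2 = none) ∨
    ∃ k l : Nat, k < n ∧ l < n ∧ bt.2 = some ((k : Int), (l : Int)) ∧
      b.2 = some (chF grid (n : Int) k l))

lemma pairCell (grid : List (List Int)) (n : Nat) {k l : Nat} (hk : k < n) (hl : l < n)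
    {bt : Int × Option (Int × Int)} {b : Int × Option Chain} (h : Rrel grid n bt b) :
    Rrel grid n (bScanCell (bTable grid (n : Int)) (k : Int) bt (l : Int))
      (scStep grid n k l b) := by
  obtain ⟨h1, h2⟩ := h
  unfold bScanCell scStep
  rw [h1]
  split_ifs with hc
  · exact ⟨rfl, Or.inr ⟨k, l, hk, hl, rfl, rfl⟩⟩
  · exact ⟨h1, h2⟩

lemma pairRow (grid : List (List Int)) (n : Nat) {k : Nat} (hk : k < n) (js : List Nat)
    (hjs : ∀ j ∈ js, j < n) {bt : Int × Option (Int × Int)} {b : Int × Option Chain}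
    (h : Rrel grid n bt b) :
    Rrel grid n
      (js.foldl (fun bt (j : Nat) => bScanCell (bTable grid (n : Int)) (k : Int) bt (j : Int)) bt)
      (js.foldl (fun b j => scStep grid n k j b) b) := by
  induction js generalizing bt b with
  | nil => exact h
  | cons j js ih =>
    simp only [List.foldl_cons]
    exact ih (fun x hx => hjs x (List.mem_cons_of_mem _ hx))
      (pairCell grid n hk (hjs j (List.mem_cons_self)) h)

lemma pairAll (grid : List (List Int)) (n : Nat) (is : List Nat)
    (his : ∀ i ∈ is, i < n) {bt : Int × Option (Int × Int)} {b : Int × Option Chain}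
    (h : Rrel grid n bt b) :
    Rrel grid n
      (is.foldl (fun bt (i : Nat) => (List.range n).foldl
        (fun bt (j : Nat) => bScanCell (bTable grid (n : Int)) (i : Int) bt (j : Int)) bt) bt)
      (is.foldl (fun b i => rowScan grid n i b) b) := by
  induction is generalizing bt b with
  | nil => exact h
  | cons i is ih =>
    simp only [List.foldl_cons]
    exact ih (fun x hx => his x (List.mem_cons_of_mem _ hx))
      (pairRow grid n (his i (List.mem_cons_self)) (List.range n)
        (fun j hj => List.mem_range.mp hj) h)

lemma pyfold_range {α : Type} (n : Nat) (g : α → Int → α) (init : α) :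
    (PySem.List.pyRange 0 (n : Int) 1).foldl g init
      = (List.range n).foldl (fun a (k : Nat) => g a (k : Int)) init := by
  rw [PySem.List.pyRange_one]
  have h : ((n : Int) - 0).toNat = n := by simp
  rw [h, List.foldl_map]
  simp only [zero_add]

lemma ports_eq (grid : List (List Int)) :
    findMaxLengthSnakeSequence grid = findMaxLengthSnakeSequence_alt grid := by
  unfold findMaxLengthSnakeSequence findMaxLengthSnakeSequence_alt
  simp only [map_const_pyRange]
  set n := grid.length with hn
  rw [outer_inv grid n n le_rfl, Nat.sub_self, List.replicate_zero, List.append_nil,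
      ← bTable_eq_TkF, outerB grid n n le_rfl]
  have hA : (PySem.List.pyRange 0 (n : Int) 1).foldl
      (fun bt i => (PySem.List.pyRange 0 (n : Int) 1).foldl (bScanCell (bTable grid (n : Int)) i) bt)
      ((0 : Int), (none : Option (Int × Int)))
      = (List.range n).foldl (fun bt (i : Nat) => (List.range n).foldl
          (fun bt (j : Nat) => bScanCell (bTable grid (n : Int)) (i : Int) bt (j : Int)) bt)
          (0, none) := by
    rw [pyfold_range]
    congr 1
    funext bt i
    rw [pyfold_range]
  rw [hA]
  have hrel := pairAll grid n (List.range n) (fun i hi => List.mem_range.mp hi)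
    (show Rrel grid n ((0 : Int), none) ((0 : Int), none) from ⟨rfl, Or.inl ⟨rfl, rfl⟩⟩)
  obtain ⟨h1, h2⟩ := hrel
  rcases h2 with ⟨ha, hb⟩ | ⟨k, l, hk, hl, ha, hb⟩
  · dsimp only
    rw [ha, hb]
  · dsimp only
    rw [ha, hb]
    show constructPath (bTable grid (n : Int)) grid ((k : Int), (l : Int))
      = unfoldChain [] (chF grid (n : Int) k l)
    unfold constructPath
    have hr := recon grid n (k + l) k l le_rfl hk hl []
    simpa using hr.symm

-- ===== VERDICT (by name: the statements are the Claim_ definitions above) =====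
theorem findMaxLengthSnakeSequence_spec : Claim_equal_findMaxLengthSnakeSequence := by
  intro grid _ _
  exact ports_eq grid
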